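-- pv_equiv track=rewrite | github.com/LeeGukHeon/AutoLife | scripts/run_phase34_operations_tuning.py | dominant_label
-- ===== SOURCE A (Python) =====
-- from typing import Any, Dict, List
--
-- def i64(v: Any, d: int = 0) -> int:
--     try:
--         return int(float(v))
--     except Exception:
--         return int(d)
--
-- def dominant_label(rows: Any, default: str = "ANY") -> str:
--     if not isinstance(rows, list):
--         return default
--     best_label = str(default)
--     best_count = -1
--     for row in rows:
--         if not isinstance(row, dict):
--             continue
--         label = str(row.get("label", "")).strip()
--         if not label:
--             continue
--         count = max(0, i64(row.get("candidate_total", 0), 0))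
--         if count > best_count or (count == best_count and label < best_label):
--             best_label = label
--             best_count = count
--     return best_label if best_count >= 0 else default
-- ===== SOURCE B (Python) =====
-- from typing import Any
--
-- def i64(v: Any, d: int = 0) -> int:
--     try:
--         return int(float(v))
--     except Exception:
--         return int(d)
--
-- def dominant_label(rows: Any, default: str = "ANY") -> str:
--     if not isinstance(rows, list):
--         return default
--     pairs = [
--         (max(0, i64(row.get("candidate_total", 0), 0)),
--          str(row.get("label", "")).strip())
--         for row in rows
--         if isinstance(row, dict) and str(row.get("label", "")).strip()
--     ]
--     if not pairs:
--         return default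
--     best = max(c for c, _ in pairs)
--     return min(l for c, l in pairs if c == best)
-- ===== Notes on version B (the rewrite author's own statement) =====
-- stated objective: alternative
-- what changed: Replaces the single running-best pass with a collect-then-reduce shape: build the list of (count, label) candidate pairs, then take the maximal count and the lexicographically smallest label among the pairs attaining it.
-- outside the precondition, e.g. on dominant_label([{'label': 'x', 'candidate_total': '2.9'}], 'ANY'): A returns 'x', B returns 'x'
import Mathlib
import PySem

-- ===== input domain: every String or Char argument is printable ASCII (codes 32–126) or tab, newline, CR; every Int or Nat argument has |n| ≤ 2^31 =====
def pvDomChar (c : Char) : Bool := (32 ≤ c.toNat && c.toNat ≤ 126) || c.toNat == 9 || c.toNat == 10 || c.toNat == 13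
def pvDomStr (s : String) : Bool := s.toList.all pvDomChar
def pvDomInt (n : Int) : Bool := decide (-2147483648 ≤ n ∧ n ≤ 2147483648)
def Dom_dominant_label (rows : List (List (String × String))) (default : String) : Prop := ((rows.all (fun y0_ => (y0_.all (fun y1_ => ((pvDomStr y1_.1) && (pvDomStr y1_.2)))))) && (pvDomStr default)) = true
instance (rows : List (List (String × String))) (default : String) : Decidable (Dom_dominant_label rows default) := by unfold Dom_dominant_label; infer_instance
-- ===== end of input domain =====

-- B replaces A's single running-best pass with a collect-then-reduce shape (same cost); the
-- Lean ports model i64's int(float(v)) as int(v), exact on the inputs Pre_ admits.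


-- ===== PORT A =====
-- i64(v, 0) for a string v: on Pre_ (candidate_total either an int-literal with |n| ≤ 2^53, or a
-- string float() rejects, or digitless so int(float(v)) raises), int(float(v)) = int(v); a failed
-- parse returns the default 0. Exact on Pre_.
def i64A (v : String) : Int :=
  ((PySem.Int.ofStr? v).getD 0)

-- the body of A's for-loop, state = (best_label, best_count); rows are dicts, labels always strings
def dlLoopA : List (List (String × String)) → String → Int → String × Int
  | [], bl, bc => (bl, bc)
  | row :: rest, bl, bc =>
    let label := PySem.Str.strip ((PySem.Dict.mk row).getD "label" "")
    if label = "" then dlLoopA rest bl bc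
    else
      let count := max 0 (match (PySem.Dict.mk row).get? "candidate_total" with
                          | none => (0 : Int)
                          | some v => i64A v)
      if count > bc ∨ (count = bc ∧ label < bl) then dlLoopA rest label count
      else dlLoopA rest bl bc

def dominant_label (rows : List (List (String × String))) (default : String) : String :=
  let st := dlLoopA rows default (-1)
  if st.2 ≥ 0 then st.1 else default

-- ===== PORT B =====
def i64B (v : String) : Int :=
  ((PySem.Int.ofStr? v).getD 0)

-- the candidate (count, label) pairs of Source B's list comprehension
def dlPairs (rows : List (List (String × String))) : List (Int × String) :=
  rows.filterMap (fun row =>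
    let label := PySem.Str.strip ((PySem.Dict.mk row).getD "label" "")
    if label = "" then none
    else some (max 0 (match (PySem.Dict.mk row).get? "candidate_total" with
                      | none => (0 : Int)
                      | some v => i64B v), label))

def dominant_label_alt (rows : List (List (String × String))) (default : String) : String :=
  let pairs := dlPairs rows
  match PySem.List.max? (pairs.map Prod.fst) (fun c => c) with
  | none => default    -- pairs empty
  | some best =>
    ((PySem.List.min? ((pairs.filter (fun p => p.1 == best)).map Prod.snd) (fun l => l)).getD default)

-- ===== PRECONDITION & SPEC =====
-- lexical shape of strings CPython's float() accepts: ws* sign? (inf|infinity|nan|number) ws*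
def pvIsWs (c : Char) : Bool := c = ' ' || c = '\t' || c = '\n' || c = '\r'

-- digit run with single underscores between digits; returns the unconsumed tail
def pvDigTail : List Char → List Char
  | '_' :: c :: cs => if c.isDigit then pvDigTail cs else '_' :: c :: cs
  | c :: cs => if c.isDigit then pvDigTail cs else c :: cs
  | [] => []

def pvDigits? : List Char → Option (List Char)
  | c :: cs => if c.isDigit then some (pvDigTail cs) else none
  | [] => none

def pvExpTail (cs : List Char) : Bool :=
  let cs' := match cs with | '+' :: t => t | '-' :: t => t | t => t
  match pvDigits? cs' with
  | some r => r.all pvIsWs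
  | none => false

def pvAfterMant : List Char → Bool
  | [] => true
  | 'e' :: cs => pvExpTail cs
  | 'E' :: cs => pvExpTail cs
  | cs => cs.all pvIsWs

def pvMant (cs : List Char) : Bool :=
  match pvDigits? cs with
  | some r =>
    match r with
    | '.' :: r2 =>
      (match pvDigits? r2 with
       | some r3 => pvAfterMant r3
       | none => pvAfterMant r2)
    | _ => pvAfterMant r
  | none =>
    match cs with
    | '.' :: r2 => (match pvDigits? r2 with | some r3 => pvAfterMant r3 | none => false)
    | _ => false

def pvInfNan (cs : List Char) : Bool :=
  let l := PySem.Chars.lower cs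
  (l.take 8 = "infinity".toList && (l.drop 8).all pvIsWs) ||
  (l.take 3 = "inf".toList && (l.drop 3).all pvIsWs) ||
  (l.take 3 = "nan".toList && (l.drop 3).all pvIsWs)

def pvFloatLike (s : String) : Bool :=
  let cs := s.toList.dropWhile pvIsWs
  let cs' := match cs with | '+' :: t => t | '-' :: t => t | t => t
  pvInfNan cs' || pvMant cs'

-- a candidate_total string the Lean model of i64 is exact on: an int literal float() keeps exact
-- (|n| ≤ 2^53), or a string float() rejects (i64 = 0), or digitless (float gives inf/nan, int()
-- raises, i64 = 0)
def pvOkTotal (v : String) : Bool :=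
  (match PySem.Int.ofStr? v with | some n => n.natAbs ≤ 2 ^ 53 | none => false)
  || !pvFloatLike v || v.toList.all (fun c => !c.isDigit)

-- Pre_ excludes inputs where a used row's candidate_total string reads as a NON-INTEGER float
-- (fraction, exponent, or an int literal beyond 2^53): there A's int(float(v)) rounds through an
-- IEEE double, which the Int-valued port does not model; A still returns a value on such inputs
-- (and Python B returns the same value — the carve-out is purely about float portability).
def Pre_dominant_label (rows : List (List (String × String))) (default : String) : Prop :=
  ∀ row ∈ rows, PySem.Str.strip ((PySem.Dict.mk row).getD "label" "") ≠ "" →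
    (((PySem.Dict.mk row).get? "candidate_total").all pvOkTotal = true)

instance (rows : List (List (String × String))) (default : String) : Decidable (Pre_dominant_label rows default) := by unfold Pre_dominant_label; infer_instance

def pvWitness_dominant_label : (List (List (String × String))) × String :=
  ([[("label", " a "), ("candidate_total", " 7 ")], [("label", "b"), ("candidate_total", "x2")]], "ANY")

def Spec_dominant_label (rows : List (List (String × String))) (default : String) (out : String) : Prop := out = dominant_label_alt rows default
instance (rows : List (List (String × String))) (default : String) (out : String) : Decidable (Spec_dominant_label rows default out) := by unfold Spec_dominant_label; infer_instance

-- ===== CLAIM (what is proved, stated in full; the proofs are below) =====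
def Claim_equal_dominant_label : Prop := ∀ (rows : List (List (String × String))) (default : String), Dom_dominant_label rows default → Pre_dominant_label rows default → Spec_dominant_label rows default (dominant_label rows default)

-- ===== LEMMAS AND PROOFS =====

-- step of A's loop, acting on candidate pairs (count, label); state = (best_label, best_count)
def dlStep (st : String × Int) (p : Int × String) : String × Int :=
  if p.1 > st.2 ∨ (p.1 = st.2 ∧ p.2 < st.1) then (p.2, p.1) else st

-- running maximum of the counts, seeded with x's count
def maxFst (x : Int × String) (q : List (Int × String)) : Int :=
  q.foldl (fun a p => max a p.1) x.1

theorem le_maxFst (x : Int × String) (q : List (Int × String)) : x.1 ≤ maxFst x q :=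
  (PySem.List.le_foldl_max_int q Prod.fst x.1).1

theorem dlLoopA_eq_foldl (rows : List (List (String × String))) (bl : String) (bc : Int) :
    dlLoopA rows bl bc = (dlPairs rows).foldl dlStep (bl, bc) := by
  induction rows generalizing bl bc with
  | nil => simp [dlLoopA, dlPairs]
  | cons row rest ih =>
    by_cases h : PySem.Str.strip ((PySem.Dict.mk row).getD "label" "") = ""
    · simp [dlLoopA, dlPairs, h, ih]
    · simp only [dlLoopA, dlPairs, List.filterMap_cons, if_neg h, List.foldl_cons, dlStep,
        i64A, i64B]
      split <;> split <;> exact ih _ _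

theorem dlPairs_fst_nonneg (rows : List (List (String × String))) (p : Int × String)
    (hp : p ∈ dlPairs rows) : 0 ≤ p.1 := by
  rcases List.mem_filterMap.mp hp with ⟨row, _, hrow⟩
  simp only at hrow
  split at hrow
  · exact absurd hrow (by simp)
  · injection hrow with h'
    rw [← h']
    exact le_max_left 0 _

theorem foldl_dlStep_spec : ∀ (q : List (Int × String)) (x : Int × String),
    (q.foldl dlStep (x.2, x.1)).2 = maxFst x q ∧
    ((q.foldl dlStep (x.2, x.1)).2, (q.foldl dlStep (x.2, x.1)).1) ∈ x :: q ∧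
    ∀ p ∈ x :: q, p.1 < maxFst x q ∨ (p.1 = maxFst x q ∧ (q.foldl dlStep (x.2, x.1)).1 ≤ p.2) := by
  intro q
  induction q with
  | nil =>
    intro x
    refine ⟨rfl, List.mem_cons_self .., ?_⟩
    intro p hp
    rcases List.mem_cons.mp hp with rfl | h
    · exact Or.inr ⟨rfl, le_refl _⟩
    · cases h
  | cons y t ih =>
    intro x
    rw [List.foldl_cons]
    by_cases hc : y.1 > x.1 ∨ (y.1 = x.1 ∧ y.2 < x.2)
    · have hstep : dlStep (x.2, x.1) y = (y.2, y.1) := by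
        unfold dlStep; rw [if_pos]; exact hc
      rw [hstep]
      have hm : maxFst y t = maxFst x (y :: t) := by
        simp only [maxFst, List.foldl_cons]
        have hxy : max x.1 y.1 = y.1 := by rcases hc with h | ⟨h, _⟩ <;> omega
        rw [hxy]
      obtain ⟨h1, h2, h3⟩ := ih y
      refine ⟨h1.trans hm, List.mem_cons_of_mem _ h2, ?_⟩
      intro p hp
      rw [← hm]
      rcases List.mem_cons.mp hp with rfl | hp'
      · rcases hc with h | ⟨he, hy⟩
        · exact Or.inl (lt_of_lt_of_le h (le_maxFst y t))
        · rcases h3 y (List.mem_cons_self ..) with h4 | ⟨h4, h5⟩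
          · exact Or.inl (by omega)
          · exact Or.inr ⟨by omega, le_trans h5 hy.le⟩
      · exact h3 p hp'
    · have hstep : dlStep (x.2, x.1) y = (x.2, x.1) := by
        unfold dlStep; rw [if_neg]; exact hc
      rw [hstep]
      push Not at hc
      have hm : maxFst x t = maxFst x (y :: t) := by
        simp only [maxFst, List.foldl_cons]
        have hxy : max x.1 y.1 = x.1 := by have := hc.1; omega
        rw [hxy]
      obtain ⟨h1, h2, h3⟩ := ih x
      refine ⟨h1.trans hm, ?_, ?_⟩
      · rcases List.mem_cons.mp h2 with he | ht
        · rw [he]; exact List.mem_cons_self ..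
        · exact List.mem_cons_of_mem _ (List.mem_cons_of_mem _ ht)
      · intro p hp
        rw [← hm]
        rcases List.mem_cons.mp hp with rfl | hp'
        · exact h3 p (List.mem_cons_self ..)
        · rcases List.mem_cons.mp hp' with rfl | hp''
          · rcases h3 x (List.mem_cons_self ..) with h4 | ⟨h4, h5⟩
            · exact Or.inl (lt_of_le_of_lt hc.1 h4)
            · by_cases he : p.1 = x.1
              · exact Or.inr ⟨by omega, le_trans h5 (hc.2 he)⟩
              · exact Or.inl (by have := hc.1; omega)
          · exact h3 p (List.mem_cons_of_mem _ hp'')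

-- ===== VERDICT (by name: the statement is the Claim_ definition above) =====
theorem dominant_label_spec : Claim_equal_dominant_label := by
  unfold Claim_equal_dominant_label
  intro rows default _ _
  unfold Spec_dominant_label
  unfold dominant_label dominant_label_alt
  show (if (dlLoopA rows default (-1)).2 ≥ 0 then (dlLoopA rows default (-1)).1 else default) =
    (match PySem.List.max? ((dlPairs rows).map Prod.fst) (fun c => c) with
     | none => default
     | some best =>
       ((PySem.List.min? (((dlPairs rows).filter (fun p => p.1 == best)).map Prod.snd)
         (fun l => l)).getD default))
  rw [dlLoopA_eq_foldl]
  cases hq : dlPairs rows with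
  | nil => simp [PySem.List.max?]
  | cons x q =>
    have hx0 : 0 ≤ x.1 := dlPairs_fst_nonneg rows x (hq ▸ List.mem_cons_self ..)
    have hstep : dlStep (default, -1) x = (x.2, x.1) := by
      unfold dlStep; rw [if_pos]; exact Or.inl (by omega)
    rw [List.foldl_cons, hstep]
    obtain ⟨h1, h2, h3⟩ := foldl_dlStep_spec q x
    have hge : (q.foldl dlStep (x.2, x.1)).2 ≥ 0 := by
      rw [h1]; exact le_trans hx0 (le_maxFst x q)
    have hmax : PySem.List.max? (((x :: q).map Prod.fst)) (fun c => c) = some (maxFst x q) := by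
      rw [List.map_cons, PySem.List.max?_id_cons, List.foldl_map]; rfl
    rw [hmax]
    show (if (q.foldl dlStep (x.2, x.1)).2 ≥ 0 then (q.foldl dlStep (x.2, x.1)).1 else default) =
      ((PySem.List.min? (((x :: q).filter (fun p => p.1 == maxFst x q)).map Prod.snd)
        (fun l => l)).getD default)
    have hmem : (q.foldl dlStep (x.2, x.1)).1 ∈
        (((x :: q).filter (fun p => p.1 == maxFst x q)).map Prod.snd) :=
      List.mem_map.mpr ⟨((q.foldl dlStep (x.2, x.1)).2, (q.foldl dlStep (x.2, x.1)).1),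
        List.mem_filter.mpr ⟨h2, by simp [h1]⟩, rfl⟩
    cases hmin : PySem.List.min? (((x :: q).filter (fun p => p.1 == maxFst x q)).map Prod.snd)
        (fun l => l) with
    | none =>
      rw [PySem.List.min?_eq_none_iff] at hmin
      rw [hmin] at hmem
      cases hmem
    | some m =>
      have hmle : m ≤ (q.foldl dlStep (x.2, x.1)).1 := PySem.List.min?_isMin hmin _ hmem
      have hlem : (q.foldl dlStep (x.2, x.1)).1 ≤ m := by
        rcases List.mem_map.mp (PySem.List.min?_mem hmin) with ⟨p, hpf, hpm⟩
        rcases List.mem_filter.mp hpf with ⟨hpmem, hpeq⟩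
        have hpb : p.1 = maxFst x q := by simpa using hpeq
        rcases h3 p hpmem with h4 | ⟨_, h5⟩
        · omega
        · rw [← hpm]; exact h5
      rw [if_pos hge]
      simp only [Option.getD_some]
      exact le_antisymm hlem hmle
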